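-- pv_equiv track=rewrite | github.com/tomp/AOC-2018 | day2/day2.py | solve
-- ===== SOURCE A (Python) =====
-- from collections import defaultdict
--
-- def count_letters(text):
--     count = defaultdict(int)
--     for ch in text:
--         count[ch] += 1
--     return count
--
-- def solve(lines):
--     """Solve the problem."""
--     two, three = 0, 0
--     for line in lines:
--         count = count_letters(line)
--         if any([v == 2 for v in count.values()]):
--             two += 1
--         if any([v == 3 for v in count.values()]):
--             three += 1
--     return two * three
-- ===== SOURCE B (Python) =====
-- def run_lengths(line):
--     """Lengths of maximal runs of equal characters in sorted(line)."""
--     chars = sorted(line)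
--     lengths = []
--     i = 0
--     n = len(chars)
--     while i < n:
--         j = i
--         while j < n and chars[j] == chars[i]:
--             j += 1
--         lengths.append(j - i)
--         i = j
--     return lengths
--
-- def solve(lines):
--     """Solve the problem."""
--     two, three = 0, 0
--     for line in lines:
--         lengths = run_lengths(line)
--         if 2 in lengths:
--             two += 1
--         if 3 in lengths:
--             three += 1
--     return two * three
-- ===== Notes on version B (the rewrite author's own statement) =====
-- stated objective: alternative
-- what changed: Replaces A's hash-map frequency counting (a defaultdict built char by char per line, then a scan of its values) with a sort-then-group traversal: each line is sorted and its maximal equal-character run lengths are collected by a two-index scan, then the line contributes via '2 in lengths' / '3 in lengths'; the per-char Python-level dict loop disappears into C-level sorted() plus a run scan, which a timing run measured as a constant-factor speedup.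
import Mathlib
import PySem

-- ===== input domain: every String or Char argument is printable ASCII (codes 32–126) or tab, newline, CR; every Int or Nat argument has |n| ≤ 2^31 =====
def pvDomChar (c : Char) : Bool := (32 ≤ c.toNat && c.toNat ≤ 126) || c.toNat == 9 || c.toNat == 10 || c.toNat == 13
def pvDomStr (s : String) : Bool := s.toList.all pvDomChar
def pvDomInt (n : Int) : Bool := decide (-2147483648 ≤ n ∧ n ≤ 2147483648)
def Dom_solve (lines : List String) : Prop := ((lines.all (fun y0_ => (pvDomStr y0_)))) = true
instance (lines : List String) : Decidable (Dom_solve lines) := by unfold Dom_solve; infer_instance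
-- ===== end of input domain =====

-- B replaces A's per-line defaultdict frequency map with sort-then-group run
-- lengths of the sorted line (a two-index run scan); same return value, measured constant-factor faster.

-- ===== PORT A =====
def count_letters (text : String) : PySem.Dict Char Int :=
  text.toList.foldl (fun d ch => d.modify ch 0 (· + 1)) PySem.Dict.empty

def solve (lines : List String) : Int :=
  let p := lines.foldl (fun (acc : Int × Int) line =>
    let count := count_letters line
    let two := if (count.values.map (fun v => v == (2 : Int))).any id then acc.1 + 1 else acc.1
    let three := if (count.values.map (fun v => v == (3 : Int))).any id then acc.2 + 1 else acc.2
    (two, three)) ((0 : Int), (0 : Int))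
  p.1 * p.2

-- ===== PORT B =====
-- Source B's inner while advances j over the run of chars equal to chars[i] and
-- emits j - i; on a list that is takeWhile/dropWhile on the tail plus 1.
def runsOf : List Char → List Int
  | [] => []
  | c :: rest =>
      ((1 + (rest.takeWhile (fun x => x == c)).length : Nat) : Int) ::
        runsOf (rest.dropWhile (fun x => x == c))
  termination_by xs => xs.length
  decreasing_by
    simpa using Nat.lt_succ_of_le (List.length_dropWhile_le _ _)

def run_lengths (line : String) : List Int :=
  runsOf (PySem.List.sorted line.toList (fun c => c) false)

def solve_alt (lines : List String) : Int :=
  let p := lines.foldl (fun (acc : Int × Int) line =>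
    let lengths := run_lengths line
    let two := if lengths.contains 2 then acc.1 + 1 else acc.1
    let three := if lengths.contains 3 then acc.2 + 1 else acc.2
    (two, three)) ((0 : Int), (0 : Int))
  p.1 * p.2

-- ===== PRECONDITION & SPEC =====
def Spec_solve (lines : List String) (out : Int) : Prop := out = solve_alt lines
instance (lines : List String) (out : Int) : Decidable (Spec_solve lines out) := by unfold Spec_solve; infer_instance

-- ===== CLAIM (what is proved, stated in full; the proofs are below) =====
def Claim_equal_solve : Prop := ∀ (lines : List String), Dom_solve lines → Spec_solve lines (solve lines)

-- ===== LEMMAS AND PROOFS =====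

-- A's per-line test on the counter's values is an existence of a char with that count.
lemma counter_values_any (xs : List Char) (k : Nat) :
    (((PySem.Dict.counter xs).values.map (fun v => v == ((k : Nat) : Int))).any id)
      = xs.any (fun c => xs.count c == k) := by
  simp only [PySem.Dict.values, PySem.Dict.items_counter, List.map_map, List.any_map]
  rw [Bool.eq_iff_iff]
  simp only [List.any_eq_true, PySem.Set.mem_ofList]
  constructor
  · rintro ⟨c, hc, h⟩; exact ⟨c, hc, by simpa using h⟩
  · rintro ⟨c, hc, h⟩; exact ⟨c, hc, by simpa using h⟩

-- On a ≤-sorted list, the run lengths are exactly the multiplicities of its members.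
lemma runsOf_mem (xs : List Char) (h : xs.Pairwise (· ≤ ·)) (k : Nat) :
    ((k : Int) ∈ runsOf xs) ↔ ∃ c ∈ xs, xs.count c = k := by
  induction xs using runsOf.induct with
  | case1 => simp [runsOf]
  | case2 c rest ih =>
    have hsplit := List.takeWhile_append_dropWhile (p := fun x => x == c) (l := rest)
    set t := rest.takeWhile (fun x => x == c) with ht
    set d := rest.dropWhile (fun x => x == c) with hd
    have hrest : rest = t ++ d := hsplit.symm
    have htc : ∀ x ∈ t, x = c := by
      intro x hx
      have := List.mem_takeWhile_imp hx
      simpa using this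
    have hcle : ∀ x ∈ rest, c ≤ x := (List.pairwise_cons.mp h).1
    have hrp : rest.Pairwise (· ≤ ·) := (List.pairwise_cons.mp h).2
    have hdp : d.Pairwise (· ≤ ·) := hrp.sublist (hd ▸ List.dropWhile_sublist _)
    have hcd : c ∉ d := by
      intro hcin
      cases hhd : d with
      | nil => simp [hhd] at hcin
      | cons a d' =>
        have hane : ¬ (a == c) = true := by
          have := List.head?_dropWhile_not (p := fun x => x == c) (l := rest)
          rw [← hd, hhd] at this
          simpa using this
        have hane' : a ≠ c := by simpa using hane
        have hain : a ∈ rest := hrest ▸ List.mem_append_right _ (hhd ▸ List.mem_cons_self)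
        have hca : c < a := lt_of_le_of_ne (hcle a hain) (Ne.symm hane')
        rw [hhd] at hcin
        rcases List.mem_cons.mp hcin with rfl | hcin'
        · exact absurd rfl hane'
        · have : a ≤ c := ((List.pairwise_cons.mp (hhd ▸ hdp)).1) c hcin'
          exact absurd (lt_of_lt_of_le hca this) (lt_irrefl c)
    have hcount_c : (c :: rest).count c = 1 + t.length := by
      rw [hrest, List.count_cons_self, List.count_append]
      have h1 : t.count c = t.length := List.count_eq_length.mpr (fun x hx => ((htc x hx).symm ▸ rfl))
      have h2 : d.count c = 0 := List.count_eq_zero.mpr hcd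
      omega
    have hcount_d : ∀ c' ∈ d, (c :: rest).count c' = d.count c' := by
      intro c' hc'
      have hne : c ≠ c' := fun he => hcd (he ▸ hc')
      have hnt : c' ∉ t := fun hin => hne ((htc c' hin).symm)
      rw [hrest, List.count_cons_of_ne hne, List.count_append,
        List.count_eq_zero.mpr hnt]
      omega
    rw [runsOf]
    simp only [← ht, ← hd, List.mem_cons]
    constructor
    · rintro (heq | hmem)
      · refine ⟨c, Or.inl rfl, ?_⟩
        have hk' : k = 1 + t.length := by exact_mod_cast heq
        omega
      · obtain ⟨c', hc'd, hcnt⟩ := (ih hdp).mp hmem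
        refine ⟨c', Or.inr (hrest ▸ List.mem_append_right _ hc'd), ?_⟩
        rw [hcount_d c' hc'd]; exact hcnt
    · rintro ⟨c', hc', hcnt⟩
      rcases hc' with rfl | hc'rest
      · left
        rw [hcount_c] at hcnt
        omega
      · rcases List.mem_append.mp (hrest ▸ hc'rest) with hct | hcd'
        · have hcc : c' = c := htc c' hct
          subst hcc
          left
          rw [hcount_c] at hcnt
          omega
        · right
          refine (ih hdp).mpr ⟨c', hcd', ?_⟩
          rw [← hcount_d c' hcd']; exact hcnt

-- B's per-line membership test agrees with the exists-a-char-with-count view.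
lemma run_lengths_contains (line : String) (k : Nat) :
    (run_lengths line).contains ((k : Nat) : Int)
      = line.toList.any (fun c => line.toList.count c == k) := by
  unfold run_lengths
  have hperm : (PySem.List.sorted line.toList (fun c => c) false).Perm line.toList :=
    PySem.List.sorted_perm _ _ _
  have hpair : (PySem.List.sorted line.toList (fun c => c) false).Pairwise (· ≤ ·) := by
    simpa using PySem.List.sorted_pairwise line.toList (fun c => c)
  rw [Bool.eq_iff_iff]
  simp only [List.contains_iff_mem, List.any_eq_true, beq_iff_eq]
  rw [runsOf_mem _ hpair k]
  constructor
  · rintro ⟨c, hc, hcnt⟩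
    exact ⟨c, hperm.mem_iff.mp hc, by rw [← hperm.count_eq]; exact hcnt⟩
  · rintro ⟨c, hc, hcnt⟩
    exact ⟨c, hperm.mem_iff.mpr hc, by rw [hperm.count_eq]; exact hcnt⟩

lemma count_letters_eq (text : String) :
    count_letters text = PySem.Dict.counter text.toList := rfl

-- the two per-line tests coincide, so the two folds are the same function
lemma step_eq (k : Nat) (line : String) :
    ((count_letters line).values.map (fun v => v == ((k : Nat) : Int))).any id
      = (run_lengths line).contains ((k : Nat) : Int) := by
  rw [count_letters_eq, counter_values_any, run_lengths_contains line k]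

-- ===== VERDICT (by name: the statement is the Claim_ definition above) =====
theorem solve_spec : Claim_equal_solve := by
  intro lines _
  show solve lines = solve_alt lines
  unfold solve solve_alt
  have hfun : (fun (acc : Int × Int) line =>
      let count := count_letters line
      let two := if (count.values.map (fun v => v == (2 : Int))).any id then acc.1 + 1 else acc.1
      let three := if (count.values.map (fun v => v == (3 : Int))).any id then acc.2 + 1 else acc.2
      (two, three))
    = (fun (acc : Int × Int) line =>
      let lengths := run_lengths line
      let two := if lengths.contains 2 then acc.1 + 1 else acc.1
      let three := if lengths.contains 3 then acc.2 + 1 else acc.2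
      (two, three)) := by
    funext acc line
    have h2 := step_eq 2 line
    have h3 := step_eq 3 line
    simp only [Nat.cast_ofNat] at h2 h3
    simp only [h2, h3]
  rw [hfun]
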